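-- pv_equiv track=rewrite | github.com/DoTheFlop/CodingTest | 프로그래머스/Level 3/숫자 게임/main.py | solution
-- ===== SOURCE A (Python) =====
-- def solution(A, B):
--     answer = 0
--     A.sort(reverse = True)
--     B.sort(reverse = True)
--     for i in A:
--         if i < B[0]:
--             B.pop(0)
--             answer += 1
--     return answer
-- ===== SOURCE B (Python) =====
-- def solution(A, B):
--     A2 = sorted(A, reverse=True)
--     B2 = sorted(B, reverse=True)
--     j = 0
--     for a in A2:
--         if j < len(B2) and B2[j] > a:
--             j += 1
--     return j
-- ===== Notes on version B (the rewrite author's own statement) =====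
-- stated objective: faster
-- what changed: Instead of destructively popping the front of B (an O(n) list shift per match) inside the scan of A, B keeps both sorted copies intact and advances a single integer index into B; B also does not mutate the caller's lists.
import Mathlib
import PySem

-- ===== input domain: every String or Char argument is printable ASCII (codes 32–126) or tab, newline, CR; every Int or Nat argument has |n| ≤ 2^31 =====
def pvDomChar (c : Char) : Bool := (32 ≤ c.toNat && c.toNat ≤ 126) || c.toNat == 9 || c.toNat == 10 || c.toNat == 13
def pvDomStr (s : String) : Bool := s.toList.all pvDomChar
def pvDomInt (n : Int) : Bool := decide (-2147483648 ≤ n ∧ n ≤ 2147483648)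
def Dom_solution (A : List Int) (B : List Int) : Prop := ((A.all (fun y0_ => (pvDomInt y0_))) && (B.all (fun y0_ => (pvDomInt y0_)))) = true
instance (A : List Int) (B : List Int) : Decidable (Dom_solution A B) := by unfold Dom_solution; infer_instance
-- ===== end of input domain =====

-- B replaces A's destructive pop(0) of B with a single index pointer into the sorted copy
-- (removing the O(n) shift per match); note A sorts both argument lists IN PLACE —
-- the equivalence proved here is about the return value only (B does not mutate its arguments).

-- ===== PORT A =====
-- state = (remaining B list, answer); the [] branch is where Python raises IndexError on
-- B[0] — those inputs are excluded by Pre_solution, the port just leaves the state unchanged.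
def solution (A : List Int) (B : List Int) : Int :=
  let A' := PySem.List.sorted A (fun x => x) true
  let B' := PySem.List.sorted B (fun x => x) true
  let st := A'.foldl (fun (s : List Int × Int) i =>
    match s.1 with
    | [] => s
    | h :: t => if i < h then (t, s.2 + 1) else s) (B', 0)
  st.2

-- ===== PORT B =====
-- j is Python's nonnegative index into B2; `B2[j]? = none` is exactly the failure of the
-- guard `j < len(B2)` in Source B.
def solution_alt (A : List Int) (B : List Int) : Int :=
  let A2 := PySem.List.sorted A (fun x => x) true
  let B2 := PySem.List.sorted B (fun x => x) true
  let j := A2.foldl (fun (j : Nat) a =>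
    match B2[j]? with
    | some b => if b > a then j + 1 else j
    | none => j) 0
  (j : Int)

-- ===== PRECONDITION & SPEC =====
-- Pre_ excludes EXACTLY the inputs on which the Python A raises IndexError (nothing else):
-- A raises precisely when len(B) < len(A) and, after sorting both descending, every element
-- of B beats the corresponding element of A's bottom window of size len(B) ending at
-- position len(A)-1 — then B is exhausted by pops before the loop ends and B[0] fails.
def Pre_solution (A : List Int) (B : List Int) : Prop :=
  ¬ (B.length < A.length ∧
     (((PySem.List.sorted B (fun x => x) true).zip
        ((PySem.List.sorted A (fun x => x) true).drop (A.length - 1 - B.length))).all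
        (fun p => p.2 < p.1)) = true)
instance (A : List Int) (B : List Int) : Decidable (Pre_solution A B) := by
  unfold Pre_solution; infer_instance

def pvWitness_solution : List Int × List Int := ([3, 1, 5], [2, 6, 4])

def Spec_solution (A : List Int) (B : List Int) (out : Int) : Prop := out = solution_alt A B
instance (A : List Int) (B : List Int) (out : Int) : Decidable (Spec_solution A B out) := by unfold Spec_solution; infer_instance

-- ===== CLAIM (what is proved, stated in full; the proofs are below) =====
def Claim_equal_solution : Prop := ∀ (A : List Int) (B : List Int), Dom_solution A B → Pre_solution A B → Spec_solution A B (solution A B)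

-- ===== LEMMAS AND PROOFS =====

-- Invariant: A's fold state is (B2.drop j, j) where j is B's fold state.
theorem pv_fold_inv (l B2 : List Int) (j : Nat) :
    l.foldl (fun (s : List Int × Int) i =>
      match s.1 with
      | [] => s
      | h :: t => if i < h then (t, s.2 + 1) else s) (B2.drop j, (j : Int))
    = (B2.drop (l.foldl (fun (j : Nat) a =>
        match B2[j]? with
        | some b => if b > a then j + 1 else j
        | none => j) j),
       ((l.foldl (fun (j : Nat) a =>
        match B2[j]? with
        | some b => if b > a then j + 1 else j
        | none => j) j : Nat) : Int)) := by
  induction l generalizing j with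
  | nil => simp
  | cons a t ih =>
    simp only [List.foldl_cons]
    rcases hj : B2[j]? with _ | b
    · have hlen : B2.length ≤ j := List.getElem?_eq_none_iff.mp hj
      have hdrop : B2.drop j = [] := List.drop_eq_nil_of_le hlen
      simpa [hj, hdrop] using ih j
    · have hlt : j < B2.length := (List.getElem?_eq_some_iff.mp hj).1
      have hdrop : B2.drop j = B2[j] :: B2.drop (j + 1) :=
        (List.getElem_cons_drop hlt).symm
      have hb : B2[j] = b := (List.getElem?_eq_some_iff.mp hj).2
      rw [hdrop, hb]
      by_cases hc : a < b
      · simp only [if_pos hc]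
        simpa using ih (j + 1)
      · simp only [if_neg hc]
        rw [← hb, ← hdrop]
        exact ih j

-- ===== VERDICT (by name: the statement is the Claim_ definition above) =====
theorem solution_spec : Claim_equal_solution := by
  intro A B _ _
  unfold Spec_solution solution solution_alt
  have h := pv_fold_inv (PySem.List.sorted A (fun x => x) true)
      (PySem.List.sorted B (fun x => x) true) 0
  simp only [List.drop_zero, Nat.cast_zero] at h
  simp only [h]
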